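-- pv_equiv track=rewrite | github.com/Ayush-Mishra-7/RFCListen | backend/rfc_parser.py | _is_definition_block
-- ===== SOURCE A (Python) =====
-- def _is_definition_block(lines: list[tuple[str, int]]) -> bool:
--     """
--     Return True if lines look like a definition list:
--     a term with indent N followed by body text with indent > N.
--     """
--     if len(lines) < 2:
--         return False
--
--     i = 0
--     found_def = False
--     while i < len(lines):
--         text, indent = lines[i]
--         # Look for a term: a relatively short line
--         if i + 1 < len(lines):
--             next_text, next_indent = lines[i + 1]
--             # Term line is shorter and next line is more indented
--             if next_indent > indent and len(text.strip().split()) <= 6: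
--                 found_def = True
--                 i += 1
--                 # Skip body lines (same or deeper indent)
--                 while i < len(lines) and lines[i][1] >= next_indent:
--                     i += 1
--                 continue
--         i += 1
--     return found_def
-- ===== SOURCE B (Python) =====
-- def _is_definition_block(lines: list[tuple[str, int]]) -> bool:
--     # Flat scan of consecutive pairs; A's body-skipping traversal is eliminated.
--     for (text, indent), (_, next_indent) in zip(lines, lines[1:]):
--         if next_indent > indent and len(text.strip().split()) <= 6:
--             return True
--     return False
-- ===== Notes on version B (the rewrite author's own statement) =====
-- stated objective: simpler
-- what changed: Dropped the found_def flag and the inner body-skipping while loop (which can never change the result once a hit is found): B is a single flat scan over consecutive pairs returning True at the first pair with strictly greater next indent and a <=6-word term line.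
import Mathlib
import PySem

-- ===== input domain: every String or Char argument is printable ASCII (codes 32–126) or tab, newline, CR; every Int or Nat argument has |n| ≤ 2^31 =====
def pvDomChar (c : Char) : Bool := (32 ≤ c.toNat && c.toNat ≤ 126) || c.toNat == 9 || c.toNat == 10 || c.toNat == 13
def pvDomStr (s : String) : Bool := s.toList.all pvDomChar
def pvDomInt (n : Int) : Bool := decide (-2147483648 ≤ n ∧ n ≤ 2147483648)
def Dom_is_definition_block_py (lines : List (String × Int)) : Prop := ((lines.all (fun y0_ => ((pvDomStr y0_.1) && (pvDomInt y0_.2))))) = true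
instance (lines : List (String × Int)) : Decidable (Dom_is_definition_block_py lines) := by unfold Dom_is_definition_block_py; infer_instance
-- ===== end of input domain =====

-- B removes A's found_def flag and inner body-skipping while loop (a flat scan of
-- consecutive pairs); return value is proved identical on all inputs.

-- ===== PORT A =====
-- inner 'while i < len(lines) and lines[i][1] >= next_indent: i += 1'; returns the new i.
-- The while loops are transcribed with a structural fuel argument, always called with
-- fuel = lines.length, which bounds the remaining iterations (i advances by ≥ 1 each step).
def pyA_skip (lines : List (String × Int)) (nextIndent : Int) : Nat → Nat → Nat
  | 0, i => i
  | k + 1, i =>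
    if h : i < lines.length then
      if (lines[i]'h).2 ≥ nextIndent then pyA_skip lines nextIndent k (i + 1) else i
    else i

-- outer 'while i < len(lines)' with the found_def accumulator
def pyA_loop (lines : List (String × Int)) : Nat → Nat → Bool → Bool
  | 0, _, found => found
  | k + 1, i, found =>
    if h : i < lines.length then
      -- text, indent = lines[i]
      if h2 : i + 1 < lines.length then
        -- next_text, next_indent = lines[i + 1]
        if (lines[i + 1]'h2).2 > (lines[i]'h).2 ∧
            (PySem.Str.split₀ (PySem.Str.strip (lines[i]'h).1)).length ≤ 6 then
          pyA_loop lines k (pyA_skip lines ((lines[i + 1]'h2).2) lines.length (i + 1)) true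
        else
          pyA_loop lines k (i + 1) found
      else
        pyA_loop lines k (i + 1) found
    else found

def is_definition_block_py (lines : List (String × Int)) : Bool :=
  if lines.length < 2 then false
  else pyA_loop lines lines.length 0 false

-- ===== PORT B =====
-- 'for (text, indent), (_, next_indent) in zip(lines, lines[1:])' = recursion on adjacent pairs
def pyB_scan : List (String × Int) → Bool
  | (text, indent) :: rest =>
    match rest with
    | [] => false
    | (_, nextIndent) :: _ =>
      if nextIndent > indent ∧ (PySem.Str.split₀ (PySem.Str.strip text)).length ≤ 6 then true
      else pyB_scan rest
  | [] => false

def is_definition_block_py_alt (lines : List (String × Int)) : Bool :=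
  pyB_scan lines

-- ===== PRECONDITION & SPEC =====
def Spec_is_definition_block_py (lines : List (String × Int)) (out : Bool) : Prop := out = is_definition_block_py_alt lines
instance (lines : List (String × Int)) (out : Bool) : Decidable (Spec_is_definition_block_py lines out) := by unfold Spec_is_definition_block_py; infer_instance

-- ===== CLAIM (what is proved, stated in full; the proofs are below) =====
def Claim_equal_is_definition_block_py : Prop := ∀ (lines : List (String × Int)), Dom_is_definition_block_py lines → Spec_is_definition_block_py lines (is_definition_block_py lines)

-- ===== LEMMAS AND PROOFS =====

-- once found_def is true it is never reset: the loop returns true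
theorem pyA_loop_true (lines : List (String × Int)) (k i : Nat) :
    pyA_loop lines k i true = true := by
  induction k generalizing i with
  | zero => rfl
  | succ k ih =>
    simp only [pyA_loop]
    split
    · split
      · split
        · exact ih _
        · exact ih _
      · exact ih _
    · rfl

-- with enough fuel, the loop with found = false computes B's flat scan of the remaining suffix
theorem pyA_loop_eq_scan (lines : List (String × Int)) (k i : Nat)
    (hk : lines.length ≤ k + i) :
    pyA_loop lines k i false = pyB_scan (lines.drop i) := by
  induction k generalizing i with
  | zero =>
    have hnil : lines.drop i = [] := List.drop_eq_nil_of_le (by omega)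
    rw [hnil]
    rfl
  | succ k ih =>
    simp only [pyA_loop]
    split
    · rename_i h
      have hd : lines.drop i = lines[i] :: lines.drop (i + 1) := List.drop_eq_getElem_cons h
      split
      · rename_i h2
        have hd2 : lines.drop (i + 1) = lines[i + 1] :: lines.drop (i + 2) :=
          List.drop_eq_getElem_cons h2
        rw [hd, hd2]
        simp only [pyB_scan, List.get_eq_getElem]
        split
        · exact pyA_loop_true lines _ _
        · rw [ih (i + 1) (by omega), hd2]
          simp only [pyB_scan, List.get_eq_getElem]
      · rename_i h2
        have hnil : lines.drop (i + 1) = [] := List.drop_eq_nil_of_le (by omega)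
        rw [ih (i + 1) (by omega), hnil, hd, hnil]
        simp only [pyB_scan]
    · rename_i h
      have hnil : lines.drop i = [] := List.drop_eq_nil_of_le (by omega)
      rw [hnil]
      rfl

-- ===== VERDICT (by name: the statement is the Claim_ definition above) =====
theorem is_definition_block_py_spec : Claim_equal_is_definition_block_py := by
  intro lines _
  unfold Spec_is_definition_block_py is_definition_block_py is_definition_block_py_alt
  split
  · rename_i h
    match lines, h with
    | [], _ => rfl
    | [x], _ => rfl
  · rw [pyA_loop_eq_scan lines lines.length 0 (by omega), List.drop_zero]
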